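-- pv_equiv track=rewrite | github.com/idiomaticrefactoring/pythonidiomsrefactor | build/lib/RefactoringIdioms/complicated_code_util.py | get_code_count_contain_test
-- ===== SOURCE A (Python) =====
-- def get_code_count_contain_test(complicate_code):
--     all_me_count = 0
--     all_file_count = len(list(complicate_code.keys()))
--     code_count,me_count,file_count = 0,0,0
--
--
--     file_no_test_count, me_no_test_count, code_no_test_count=0,0,0
--
--     for file_html in complicate_code:
--         no_test_flag=0
--         map_file_name = file_html.split("/")[-1][:-3]
--         # filter out test files
--         if not (map_file_name.startswith("test_") or map_file_name.endswith("_test")):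
--             no_test_flag=1
--         # file_no_test_count+=no_test_flag
--
--         if complicate_code[file_html]:
--             test_file_exist=0
--             file_exist = 0
--             # cl_count +=len(list(complicate_code[file_html].keys()))
--             for cl in complicate_code[file_html]:
--                 if complicate_code[file_html][cl]:
--                     all_me_count += len(complicate_code[file_html][cl].keys())
--                     for me in complicate_code[file_html][cl]:
--                         if complicate_code[file_html][cl][me]:
--                             if no_test_flag:
--                                 test_file_exist=1
--                                 me_no_test_count+=1
--                                 code_no_test_count += len(complicate_code[file_html][cl][me])
--
--                             me_count += 1
--                             file_exist = 1
--                             code_count += len(complicate_code[file_html][cl][me])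
--
--             file_count += file_exist
--             file_no_test_count+=test_file_exist
--
--     return file_count, me_count, code_count, all_file_count, all_me_count, file_no_test_count, me_no_test_count, code_no_test_count
-- ===== SOURCE B (Python) =====
-- def get_code_count_contain_test(complicate_code):
--     def no_test_flag(path):
--         name = path.split("/")[-1][:-3]
--         return 0 if (name.startswith("test_") or name.endswith("_test")) else 1
--
--     def summary(item):
--         # one file -> an 8-component count vector, computed independently
--         path, fd = item
--         flag = no_test_flag(path)
--         all_me = sum(len(cl) for cl in fd.values() if cl)
--         lens = [len(ls) for cl in fd.values() for ls in cl.values() if ls]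
--         exist = 1 if lens else 0
--         me, code = len(lens), sum(lens)
--         return (exist, me, code, 1, all_me, flag * exist, flag * me, flag * code)
--
--     def merge(x, y):
--         return tuple(a + b for a, b in zip(x, y))
--
--     ts = [summary(it) for it in complicate_code.items()]
--     # balanced pairwise (tree) reduction of the count vectors
--     while len(ts) > 1:
--         ts = [merge(ts[i], ts[i + 1]) if i + 1 < len(ts) else ts[i]
--               for i in range(0, len(ts), 2)]
--     return ts[0] if ts else (0, 0, 0, 0, 0, 0, 0, 0)
-- ===== Notes on version B (the rewrite author's own statement) =====
-- stated objective: alternative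
-- what changed: A tallies eight counters in one triple-nested mutating loop; B maps each file independently to an 8-component count vector and combines the vectors by a balanced pairwise (tree) reduction; Pre_ excludes association lists with duplicate keys at any dict level, which do not represent the Python dict A takes and on which key-iteration-with-lookup and pair iteration legitimately disagree.
import Mathlib
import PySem

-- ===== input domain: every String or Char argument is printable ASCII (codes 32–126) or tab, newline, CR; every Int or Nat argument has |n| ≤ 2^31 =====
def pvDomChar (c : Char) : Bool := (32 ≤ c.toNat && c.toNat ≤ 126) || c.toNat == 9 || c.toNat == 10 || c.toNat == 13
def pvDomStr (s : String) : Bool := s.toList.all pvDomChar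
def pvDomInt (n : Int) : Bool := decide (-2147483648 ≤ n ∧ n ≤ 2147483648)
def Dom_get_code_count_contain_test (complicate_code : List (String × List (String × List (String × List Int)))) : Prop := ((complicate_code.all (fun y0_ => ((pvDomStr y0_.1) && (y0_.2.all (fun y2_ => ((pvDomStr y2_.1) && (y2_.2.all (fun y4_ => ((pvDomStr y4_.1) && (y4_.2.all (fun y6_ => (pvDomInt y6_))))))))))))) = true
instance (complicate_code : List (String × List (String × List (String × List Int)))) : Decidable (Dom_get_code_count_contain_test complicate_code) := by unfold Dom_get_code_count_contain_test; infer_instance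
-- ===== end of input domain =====

-- B maps each file independently to an 8-component count vector and combines the vectors by a
-- balanced pairwise (tree) reduction, instead of A's triple-nested mutating loop; same cost.

-- ===== PORT A =====
-- no_test_flag computation: map_file_name = file_html.split("/")[-1][:-3]; the flag is an int 0/1 as in Python.
-- split on a nonempty separator always yields a nonempty list, so [-1] never raises (the getD "" is unreachable).
def aNoTestFlag (file_html : String) : Int :=
  let map_file_name := PySem.Str.slice ((PySem.List.pyGet? (((PySem.Str.split? file_html "/").getD [])) (-1)).getD "") none (some (-3))
  if ¬(PySem.Str.startswith map_file_name "test_" || PySem.Str.endswith map_file_name "_test") then 1 else 0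

-- innermost loop 'for me in complicate_code[file_html][cl]', state (all_me, code, me, meNT, codeNT, test_file_exist, file_exist).
-- Pre_ requires distinct keys at every dict level, so iterating (key, value) pairs is exactly Python's
-- 'for k in d: ... d[k]' (first-match lookup of a unique key is the pair's own value).
def aMeStep (no_test_flag : Int) (u : Int × Int × Int × Int × Int × Int × Int)
    (me : String × List Int) : Int × Int × Int × Int × Int × Int × Int :=
  let (all_me, code, me_c, meNT, codeNT, tfe, _fe) := u
  if me.2 ≠ [] then
    let (meNT, codeNT, tfe) :=
      if no_test_flag ≠ 0 then (meNT + 1, codeNT + (me.2.length : Int), (1 : Int))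
      else (meNT, codeNT, tfe)
    (all_me, code + (me.2.length : Int), me_c + 1, meNT, codeNT, tfe, (1 : Int))
  else u

-- middle loop 'for cl in complicate_code[file_html]'
def aClStep (no_test_flag : Int) (t : Int × Int × Int × Int × Int × Int × Int)
    (cl : String × List (String × List Int)) : Int × Int × Int × Int × Int × Int × Int :=
  if cl.2 ≠ [] then
    let (all_me, code, me_c, meNT, codeNT, tfe, fe) := t
    cl.2.foldl (aMeStep no_test_flag)
      (all_me + ((cl.2.map Prod.fst).length : Int), code, me_c, meNT, codeNT, tfe, fe)
  else t

-- outer loop body, state (all_me, code, me, file, fileNT, meNT, codeNT)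
def aFileStep (s : Int × Int × Int × Int × Int × Int × Int)
    (fh : String × List (String × List (String × List Int))) : Int × Int × Int × Int × Int × Int × Int :=
  let (all_me, code, me_c, file_c, fileNT, meNT, codeNT) := s
  let no_test_flag := aNoTestFlag fh.1
  if fh.2 ≠ [] then
    let inner := fh.2.foldl (aClStep no_test_flag) (all_me, code, me_c, meNT, codeNT, (0 : Int), (0 : Int))
    let (all_me', code', me_c', meNT', codeNT', tfe, fe) := inner
    (all_me', code', me_c', file_c + fe, fileNT + tfe, meNT', codeNT')
  else s

def get_code_count_contain_test (complicate_code : List (String × List (String × List (String × List Int)))) : Int × Int × Int × Int × Int × Int × Int × Int :=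
  let all_file_count : Int := ((complicate_code.map Prod.fst).length : Int)
  let r := complicate_code.foldl aFileStep (0, 0, 0, 0, 0, 0, 0)
  let (all_me, code, me_c, file_c, fileNT, meNT, codeNT) := r
  (file_c, me_c, code, all_file_count, all_me, fileNT, meNT, codeNT)

-- ===== PORT B =====
-- same filename rule as Source B's no_test_flag
def bNoTestFlag (path : String) : Int :=
  let name := PySem.Str.slice ((PySem.List.pyGet? (((PySem.Str.split? path "/").getD [])) (-1)).getD "") none (some (-3))
  if PySem.Str.startswith name "test_" || PySem.Str.endswith name "_test" then 0 else 1

def pvSum (xs : List Int) : Int := xs.foldl (· + ·) 0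

-- lens = [len(ls) for cl in fd.values() for ls in cl.values() if ls]
def pvMethods (fd : List (String × List (String × List Int))) : List Int :=
  fd.flatMap (fun cl => (cl.2.filter (fun m => !m.2.isEmpty)).map (fun m => (m.2.length : Int)))

-- all_me = sum(len(cl) for cl in fd.values() if cl)
def pvPerAllMe (fd : List (String × List (String × List Int))) : Int :=
  pvSum (((fd.map Prod.snd).filter (fun cl => !cl.isEmpty)).map (fun cl => (cl.length : Int)))

def T8 : Type := Int × Int × Int × Int × Int × Int × Int × Int

-- summary(item): one file's 8-component count vector
def bSummary (fh : String × List (String × List (String × List Int))) : T8 :=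
  let flag := bNoTestFlag fh.1
  let all_me := pvPerAllMe fh.2
  let lens := pvMethods fh.2
  let exist : Int := if lens ≠ [] then 1 else 0
  let me : Int := (lens.length : Int)
  let code : Int := pvSum lens
  (exist, me, code, 1, all_me, flag * exist, flag * me, flag * code)

-- merge(x, y): componentwise sum
def tAdd (x y : T8) : T8 :=
  (x.1 + y.1, x.2.1 + y.2.1, x.2.2.1 + y.2.2.1, x.2.2.2.1 + y.2.2.2.1,
   x.2.2.2.2.1 + y.2.2.2.2.1, x.2.2.2.2.2.1 + y.2.2.2.2.2.1,
   x.2.2.2.2.2.2.1 + y.2.2.2.2.2.2.1, x.2.2.2.2.2.2.2 + y.2.2.2.2.2.2.2)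

-- one level of the while loop: merge adjacent pairs
def bPairUp : List T8 → List T8
  | [] => []
  | [x] => [x]
  | a :: b :: rest => tAdd a b :: bPairUp rest

theorem bPairUp_length_le (l : List T8) : (bPairUp l).length ≤ l.length := by
  induction l using bPairUp.induct <;> simp [bPairUp] <;> omega

-- while len(ts) > 1: ts = pairUp(ts); then ts[0] (or the zero vector if empty)
def bReduce : List T8 → T8
  | [] => (0, 0, 0, 0, 0, 0, 0, 0)
  | [x] => x
  | a :: b :: rest => bReduce (tAdd a b :: bPairUp rest)
termination_by l => l.length
decreasing_by
  simp
  have := bPairUp_length_le rest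
  omega

def get_code_count_contain_test_alt (complicate_code : List (String × List (String × List (String × List Int)))) : Int × Int × Int × Int × Int × Int × Int × Int :=
  bReduce (complicate_code.map bSummary)

-- ===== PRECONDITION & SPEC =====
-- Pre_ excludes association lists with duplicate keys at some dict level: those do not represent a
-- Python dict (A's input type), and on them Python's key-iteration-with-lookup and plain pair
-- iteration legitimately disagree.
def Pre_get_code_count_contain_test (complicate_code : List (String × List (String × List (String × List Int)))) : Prop :=
  (complicate_code.map Prod.fst).Nodup ∧
  ∀ fd ∈ complicate_code, (fd.2.map Prod.fst).Nodup ∧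
    ∀ cl ∈ fd.2, (cl.2.map Prod.fst).Nodup
instance (complicate_code : List (String × List (String × List (String × List Int)))) : Decidable (Pre_get_code_count_contain_test complicate_code) := by unfold Pre_get_code_count_contain_test; infer_instance

def pvWitness_get_code_count_contain_test : (List (String × List (String × List (String × List Int)))) :=
  [("pkg/test_a.py", [("C", [("m", [1, 2]), ("n", [])])]),
   ("pkg/b.py", [("D", [("m", [3])]), ("E", [])])]

def Spec_get_code_count_contain_test (complicate_code : List (String × List (String × List (String × List Int)))) (out : Int × Int × Int × Int × Int × Int × Int × Int) : Prop := out = get_code_count_contain_test_alt complicate_code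
instance (complicate_code : List (String × List (String × List (String × List Int)))) (out : Int × Int × Int × Int × Int × Int × Int × Int) : Decidable (Spec_get_code_count_contain_test complicate_code out) := by
  unfold Spec_get_code_count_contain_test
  exact @instDecidableEqProd _ _ _ (@instDecidableEqProd _ _ _ (@instDecidableEqProd _ _ _ inferInstance)) _ _

-- ===== CLAIM (what is proved, stated in full; the proofs are below) =====
def Claim_equal_get_code_count_contain_test : Prop := ∀ (complicate_code : List (String × List (String × List (String × List Int)))), Dom_get_code_count_contain_test complicate_code → Pre_get_code_count_contain_test complicate_code → Spec_get_code_count_contain_test complicate_code (get_code_count_contain_test complicate_code)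

-- ===== LEMMAS AND PROOFS =====

theorem pvSum_eq (l : List Int) : pvSum l = l.sum := by
  simpa using PySem.List.foldl_add l id 0

theorem pvSum_cons (a : Int) (l : List Int) : pvSum (a :: l) = a + pvSum l := by
  simp [pvSum_eq]

theorem pvSum_append (l l' : List Int) : pvSum (l ++ l') = pvSum l + pvSum l' := by
  simp [pvSum_eq]

def pvNoTest (path : String) : Bool :=
  let name := PySem.Str.slice ((PySem.List.pyGet? (((PySem.Str.split? path "/").getD [])) (-1)).getD "") none (some (-3))
  !(PySem.Str.startswith name "test_" || PySem.Str.endswith name "_test")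

theorem aNoTestFlag_eq (p : String) : aNoTestFlag p = if pvNoTest p then 1 else 0 := by
  unfold aNoTestFlag pvNoTest
  by_cases h : (PySem.Str.startswith
      (PySem.Str.slice ((PySem.List.pyGet? (((PySem.Str.split? p "/").getD [])) (-1)).getD "") none (some (-3))) "test_" ||
    PySem.Str.endswith
      (PySem.Str.slice ((PySem.List.pyGet? (((PySem.Str.split? p "/").getD [])) (-1)).getD "") none (some (-3))) "_test") = true
  · simp [h]
  · simp [h]

theorem bNoTestFlag_eq (p : String) : bNoTestFlag p = if pvNoTest p then 1 else 0 := by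
  unfold bNoTestFlag pvNoTest
  cases h : (PySem.Str.startswith
      (PySem.Str.slice ((PySem.List.pyGet? (((PySem.Str.split? p "/").getD [])) (-1)).getD "") none (some (-3))) "test_" ||
    PySem.Str.endswith
      (PySem.Str.slice ((PySem.List.pyGet? (((PySem.Str.split? p "/").getD [])) (-1)).getD "") none (some (-3))) "_test") <;>
    simp only [h] <;> simp

-- the methods of one class: lengths of the truthy method values
def pvMs (cl : List (String × List Int)) : List Int :=
  (cl.filter (fun m => !m.2.isEmpty)).map (fun m => (m.2.length : Int))

theorem pvMethods_cons (c : String × List (String × List Int)) (fd : List (String × List (String × List Int))) :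
    pvMethods (c :: fd) = pvMs c.2 ++ pvMethods fd := by
  simp [pvMethods, pvMs]

-- per-file contributions summed over all files
def pvTotals : List (String × List (String × List (String × List Int))) → Int × Int × Int × Int × Int × Int × Int
  | [] => (0, 0, 0, 0, 0, 0, 0)
  | f :: cc =>
    (pvPerAllMe f.2 + (pvTotals cc).1,
     pvSum (pvMethods f.2) + (pvTotals cc).2.1,
     ((pvMethods f.2).length : Int) + (pvTotals cc).2.2.1,
     (if pvMethods f.2 ≠ [] then 1 else 0) + (pvTotals cc).2.2.2.1,
     (if pvNoTest f.1 ∧ pvMethods f.2 ≠ [] then 1 else 0) + (pvTotals cc).2.2.2.2.1,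
     (if pvNoTest f.1 then ((pvMethods f.2).length : Int) else 0) + (pvTotals cc).2.2.2.2.2.1,
     (if pvNoTest f.1 then pvSum (pvMethods f.2) else 0) + (pvTotals cc).2.2.2.2.2.2)

theorem aMeFold (flag : Int) (cl : List (String × List Int)) (u : Int × Int × Int × Int × Int × Int × Int) :
    cl.foldl (aMeStep flag) u =
      (u.1, u.2.1 + pvSum (pvMs cl), u.2.2.1 + ((pvMs cl).length : Int),
       u.2.2.2.1 + (if flag ≠ 0 then ((pvMs cl).length : Int) else 0),
       u.2.2.2.2.1 + (if flag ≠ 0 then pvSum (pvMs cl) else 0),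
       (if flag ≠ 0 ∧ pvMs cl ≠ [] then 1 else u.2.2.2.2.2.1),
       (if pvMs cl ≠ [] then 1 else u.2.2.2.2.2.2)) := by
  induction cl generalizing u with
  | nil => obtain ⟨a, b, c, d, e, f, g⟩ := u; simp [pvMs, pvSum]
  | cons m cl ih =>
    obtain ⟨a, b, c, d, e, f, g⟩ := u
    simp only [List.foldl_cons]
    rw [ih]
    by_cases hm : m.2 = []
    · have hms : pvMs (m :: cl) = pvMs cl := by simp [pvMs, hm]
      simp [aMeStep, hm, hms]
    · have hms : pvMs (m :: cl) = (m.2.length : Int) :: pvMs cl := by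
        simp [pvMs, List.filter_cons, hm]
      by_cases hf : flag = 0 <;>
        simp [aMeStep, hm, hms, pvSum_cons, hf] <;> and_intros <;>
        first | rfl | (push_cast; ring) | omega | simp_all

theorem aClFold (flag : Int) (fd : List (String × List (String × List Int))) (t : Int × Int × Int × Int × Int × Int × Int) :
    fd.foldl (aClStep flag) t =
      (t.1 + pvPerAllMe fd,
       t.2.1 + pvSum (pvMethods fd), t.2.2.1 + ((pvMethods fd).length : Int),
       t.2.2.2.1 + (if flag ≠ 0 then ((pvMethods fd).length : Int) else 0),
       t.2.2.2.2.1 + (if flag ≠ 0 then pvSum (pvMethods fd) else 0),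
       (if flag ≠ 0 ∧ pvMethods fd ≠ [] then 1 else t.2.2.2.2.2.1),
       (if pvMethods fd ≠ [] then 1 else t.2.2.2.2.2.2)) := by
  induction fd generalizing t with
  | nil => obtain ⟨a, b, c, d, e, f, g⟩ := t; simp [pvMethods, pvPerAllMe, pvSum]
  | cons c fd ih =>
    obtain ⟨a, b, c0, d, e, f, g⟩ := t
    simp only [List.foldl_cons]
    rw [ih]
    by_cases hc : c.2 = []
    · have h1 : pvMethods (c :: fd) = pvMethods fd := by simp [pvMethods_cons, pvMs, hc]
      have h2 : pvPerAllMe (c :: fd) = pvPerAllMe fd := by simp [pvPerAllMe, hc]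
      simp [aClStep, hc, h1, h2]
    · have h1 : pvMethods (c :: fd) = pvMs c.2 ++ pvMethods fd := pvMethods_cons c fd
      have h2 : pvPerAllMe (c :: fd) = (c.2.length : Int) + pvPerAllMe fd := by
        simp [pvPerAllMe, List.filter_cons, hc, pvSum_cons]
      simp only [aClStep, hc, ne_eq, not_false_iff, if_true]
      rw [aMeFold]
      simp only [h1, h2, pvSum_append, List.length_append, List.length_map, Prod.mk.injEq, ne_eq,
        List.append_eq_nil_iff]
      refine ⟨by push_cast; ring, by ring, by push_cast; ring, ?_, ?_, ?_, ?_⟩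
      · split_ifs <;> first | (push_cast; ring) | simp
      · split_ifs <;> first | ring | simp
      · split_ifs <;> simp_all
      · split_ifs <;> simp_all

theorem aFileFold (cc : List (String × List (String × List (String × List Int))))
    (s : Int × Int × Int × Int × Int × Int × Int) :
    cc.foldl aFileStep s =
      (s.1 + (pvTotals cc).1, s.2.1 + (pvTotals cc).2.1, s.2.2.1 + (pvTotals cc).2.2.1,
       s.2.2.2.1 + (pvTotals cc).2.2.2.1, s.2.2.2.2.1 + (pvTotals cc).2.2.2.2.1,
       s.2.2.2.2.2.1 + (pvTotals cc).2.2.2.2.2.1, s.2.2.2.2.2.2 + (pvTotals cc).2.2.2.2.2.2) := by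
  induction cc generalizing s with
  | nil => obtain ⟨a, b, c, d, e, f, g⟩ := s; simp [pvTotals]
  | cons fh cc ih =>
    obtain ⟨a, b, c, d, e, f, g⟩ := s
    simp only [List.foldl_cons]
    rw [ih]
    by_cases hf : fh.2 = []
    · have h1 : pvMethods fh.2 = [] := by simp [pvMethods, hf]
      have h2 : pvPerAllMe fh.2 = 0 := by simp [pvPerAllMe, hf, pvSum]
      have h3 : pvSum (pvMethods fh.2) = 0 := by simp [h1, pvSum]
      simp [aFileStep, hf, pvTotals, h1, h2, h3, pvMethods, pvSum, pvPerAllMe] <;> and_intros <;>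
        first | rfl | (push_cast; ring) | omega | simp_all [pvMethods, pvPerAllMe, pvSum]
    · simp only [aFileStep, hf, ne_eq, not_false_iff, if_true]
      rw [aClFold, aNoTestFlag_eq]
      by_cases hb : pvNoTest fh.1 <;>
        simp [hb, pvTotals] <;> and_intros <;>
        first | rfl | (push_cast; ring) | omega | simp_all

-- B-side: the tree reduction computes the componentwise sum = foldl tAdd of the list
def tZero : T8 := (0, 0, 0, 0, 0, 0, 0, 0)

theorem tAdd_assoc (x y z : T8) : tAdd (tAdd x y) z = tAdd x (tAdd y z) := by
  obtain ⟨a1, a2, a3, a4, a5, a6, a7, a8⟩ := x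
  obtain ⟨b1, b2, b3, b4, b5, b6, b7, b8⟩ := y
  obtain ⟨c1, c2, c3, c4, c5, c6, c7, c8⟩ := z
  simp [tAdd, add_assoc]

theorem tAdd_zero_left (x : T8) : tAdd tZero x = x := by
  obtain ⟨a1, a2, a3, a4, a5, a6, a7, a8⟩ := x
  simp [tAdd, tZero]

theorem bPairUp_foldl (l : List T8) (z : T8) :
    (bPairUp l).foldl tAdd z = l.foldl tAdd z := by
  induction l using bPairUp.induct generalizing z with
  | case1 => rfl
  | case2 x => rfl
  | case3 a b rest ih =>
    simp only [bPairUp, List.foldl_cons]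
    rw [ih, tAdd_assoc]

theorem bReduce_eq (l : List T8) : bReduce l = l.foldl tAdd tZero := by
  induction l using bReduce.induct with
  | case1 => simp [bReduce, tZero]
  | case2 x => simp [bReduce, tAdd_zero_left]
  | case3 a b rest ih =>
    rw [bReduce, ih]
    have := bPairUp_foldl (a :: b :: rest) tZero
    simpa [bPairUp] using this

theorem bFold (cc : List (String × List (String × List (String × List Int)))) (z : T8) :
    (cc.map bSummary).foldl tAdd z =
      tAdd z ((pvTotals cc).2.2.2.1, (pvTotals cc).2.2.1, (pvTotals cc).2.1, (cc.length : Int),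
              (pvTotals cc).1, (pvTotals cc).2.2.2.2.1, (pvTotals cc).2.2.2.2.2.1,
              (pvTotals cc).2.2.2.2.2.2) := by
  induction cc generalizing z with
  | nil =>
    obtain ⟨a1, a2, a3, a4, a5, a6, a7, a8⟩ := z
    simp [pvTotals, tAdd]
  | cons f cc ih =>
    simp only [List.map_cons, List.foldl_cons]
    rw [ih]
    obtain ⟨a1, a2, a3, a4, a5, a6, a7, a8⟩ := z
    simp only [bSummary, bNoTestFlag_eq, pvTotals, tAdd, Prod.mk.injEq]
    by_cases hb : pvNoTest f.1 <;> by_cases hm : pvMethods f.2 = [] <;>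
      simp [hb, hm] <;> and_intros <;> push_cast <;> ring

theorem alt_eq_totals (cc : List (String × List (String × List (String × List Int)))) :
    get_code_count_contain_test_alt cc =
      ((pvTotals cc).2.2.2.1, (pvTotals cc).2.2.1, (pvTotals cc).2.1, (cc.length : Int),
       (pvTotals cc).1, (pvTotals cc).2.2.2.2.1, (pvTotals cc).2.2.2.2.2.1, (pvTotals cc).2.2.2.2.2.2) := by
  show bReduce (cc.map bSummary) = _
  rw [bReduce_eq, bFold, tAdd_zero_left]

-- ===== VERDICT (by name: the statement is the Claim_ definition above) =====
theorem get_code_count_contain_test_spec : Claim_equal_get_code_count_contain_test := by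
  intro cc _ _
  unfold Spec_get_code_count_contain_test
  show get_code_count_contain_test cc = _
  rw [alt_eq_totals]
  unfold get_code_count_contain_test
  rw [aFileFold]
  simp
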